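-- pv_equiv track=rewrite | github.com/bankuvip/banku-app | utils/file_utils.py | is_filename_safe
-- ===== SOURCE A (Python) =====
-- def is_filename_safe(filename):
--     """
--     Check if filename is safe (no path traversal, special characters, etc.)
--
--     Args:
--         filename: The filename to check
--
--     Returns:
--         True if filename is safe, False otherwise
--     """
--     import re
--
--     # Check for path traversal attempts
--     if '..' in filename or '/' in filename or '\\' in filename:
--         return False
--
--     # Check for dangerous characters
--     dangerous_chars = ['<', '>', ':', '"', '|', '?', '*']
--     if any(char in filename for char in dangerous_chars):
--         return False
--
--     # Check filename length
--     if len(filename) > 255: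
--         return False
--
--     # Check for empty or only whitespace
--     if not filename.strip():
--         return False
--
--     return True
-- ===== SOURCE B (Python) =====
-- def is_filename_safe(filename):
--     """One-pass scan: forbidden chars, adjacent '..', length, and whitespace-only check."""
--     if len(filename) > 255:
--         return False
--     forbidden = {'<', '>', ':', '"', '|', '?', '*', '/', '\\'}
--     prev = None
--     seen_nonspace = False
--     for c in filename:
--         if c in forbidden:
--             return False
--         if prev == '.' and c == '.':
--             return False
--         if not c.isspace():
--             seen_nonspace = True
--         prev = c
--     return seen_nonspace
-- ===== Notes on version B (the rewrite author's own statement) =====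
-- stated objective: alternative
-- what changed: A runs several independent substring/membership scans (.., /, \, seven dangerous chars) plus a strip(); B makes one linear pass over the characters, tracking the previous character (adjacent '..' detection), a forbidden-character set, and a seen-non-whitespace flag, with the length check done up front.
import Mathlib
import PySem

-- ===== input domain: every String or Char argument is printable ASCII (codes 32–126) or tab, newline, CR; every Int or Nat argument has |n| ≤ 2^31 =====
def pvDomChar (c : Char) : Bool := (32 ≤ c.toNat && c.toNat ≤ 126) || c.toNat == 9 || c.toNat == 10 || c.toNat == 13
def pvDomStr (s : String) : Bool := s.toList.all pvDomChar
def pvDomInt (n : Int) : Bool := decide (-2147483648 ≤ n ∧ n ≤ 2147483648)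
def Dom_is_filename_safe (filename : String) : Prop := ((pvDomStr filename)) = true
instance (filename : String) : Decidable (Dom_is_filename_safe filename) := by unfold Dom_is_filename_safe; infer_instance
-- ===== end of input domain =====

-- B replaces A's several independent substring scans by one linear pass over the characters
-- that tracks the previous character and a seen-non-whitespace flag (objective: alternative decomposition).

-- ===== PORT A =====
def is_filename_safe (filename : String) : Bool :=
  -- Check for path traversal attempts
  if PySem.Str.isIn ".." filename || PySem.Str.isIn "/" filename || PySem.Str.isIn "\\" filename then
    false
  -- Check for dangerous characters
  else if (["<", ">", ":", "\"", "|", "?", "*"] : List String).any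
      (fun ch => PySem.Str.isIn ch filename) then
    false
  -- Check filename length
  else if PySem.Str.len filename > 255 then
    false
  -- Check for empty or only whitespace
  else if PySem.Str.strip filename == "" then
    false
  else
    true

-- ===== PORT B =====
def pvForbidden : PySem.Set Char :=
  PySem.Set.ofList ['<', '>', ':', '"', '|', '?', '*', '/', '\\']

-- the for-loop of Source B: state = (prev, seen_nonspace)
def pvScan : List Char → Option Char → Bool → Bool
  | [], _, seen => seen
  | c :: rest, prev, seen =>
    if pvForbidden.contains c then false
    else if prev == some '.' && c == '.' then false
    else pvScan rest (some c) (seen || !PySem.Chars.isspace c)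

def is_filename_safe_alt (filename : String) : Bool :=
  if PySem.Str.len filename > 255 then false
  else pvScan filename.toList none false

-- ===== PRECONDITION & SPEC =====
def Spec_is_filename_safe (filename : String) (out : Bool) : Prop := out = is_filename_safe_alt filename
instance (filename : String) (out : Bool) : Decidable (Spec_is_filename_safe filename out) := by unfold Spec_is_filename_safe; infer_instance

-- ===== CLAIM (what is proved, stated in full; the proofs are below) =====
def Claim_equal_is_filename_safe : Prop := ∀ (filename : String), Dom_is_filename_safe filename → Spec_is_filename_safe filename (is_filename_safe filename)

-- ===== LEMMAS AND PROOFS =====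

-- adjacent-'..' detector used only by the proofs
def pvHasDD : List Char → Bool
  | '.' :: '.' :: _ => true
  | _ :: rest => pvHasDD rest
  | [] => false

def pvHeadDot : List Char → Bool
  | '.' :: _ => true
  | _ => false

theorem pvHeadDot_cons (c : Char) (rest : List Char) :
    pvHeadDot (c :: rest) = (c == '.') := by
  by_cases h : c = '.' <;> simp [pvHeadDot, h]

theorem pvHasDD_cons (c : Char) (rest : List Char) :
    pvHasDD (c :: rest) = ((c == '.') && pvHeadDot rest || pvHasDD rest) := by
  match rest with
  | [] => by_cases h : c = '.' <;> simp [pvHasDD, pvHeadDot, h]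
  | d :: t =>
    by_cases h : c = '.' <;> by_cases h2 : d = '.' <;>
      simp [pvHasDD, pvHeadDot, h, h2]

theorem pvPrefixDD (c : Char) (rest : List Char) :
    ['.', '.'] <+: c :: rest ↔ (c = '.' ∧ pvHeadDot rest = true) := by
  cases rest with
  | nil =>
    constructor
    · intro h; have := h.length_le; simp at this
    · rintro ⟨-, h⟩; simp [pvHeadDot] at h
  | cons d t =>
    rw [pvHeadDot_cons]
    constructor
    · intro h
      rcases List.cons_prefix_cons.mp h with ⟨h1, h2⟩
      rcases List.cons_prefix_cons.mp h2 with ⟨h3, -⟩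
      exact ⟨h1.symm, by simp [h3.symm]⟩
    · rintro ⟨rfl, h⟩
      have hd : d = '.' := by simpa using h
      subst hd
      exact List.cons_prefix_cons.mpr ⟨rfl, List.cons_prefix_cons.mpr ⟨rfl, List.nil_prefix⟩⟩

theorem pvHasDD_iff (l : List Char) : ['.', '.'] <:+: l ↔ pvHasDD l = true := by
  induction l with
  | nil => simp [pvHasDD]
  | cons c rest ih =>
    rw [List.infix_cons_iff, pvHasDD_cons, Bool.or_eq_true, Bool.and_eq_true, beq_iff_eq]
    exact or_congr (pvPrefixDD c rest) ih

theorem pvDropWhile_all (p : Char → Bool) (l : List Char) :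
    (∀ c ∈ l.dropWhile p, p c) ↔ (∀ c ∈ l, p c) := by
  induction l with
  | nil => simp
  | cons c t ih =>
    by_cases h : p c <;> simp [h, ih]

theorem pvStrip_nil_iff (l : List Char) :
    PySem.Chars.strip l = [] ↔ ∀ c ∈ l, PySem.Chars.isspace c := by
  simp [PySem.Chars.strip, PySem.Chars.lstrip, PySem.Chars.rstrip,
    List.dropWhile_eq_nil_iff, pvDropWhile_all]

theorem pvScan_spec (l : List Char) (prev : Option Char) (seen : Bool) :
    pvScan l prev seen =
      (l.all (fun c => !pvForbidden.contains c) &&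
       !((prev == some '.') && pvHeadDot l) && !pvHasDD l &&
       (seen || l.any (fun c => !PySem.Chars.isspace c))) := by
  induction l generalizing prev seen with
  | nil => simp [pvScan, pvHasDD, pvHeadDot]
  | cons c rest ih =>
    rw [pvScan, ih, pvHasDD_cons]
    simp only [List.all_cons, List.any_cons, pvHeadDot_cons,
      show ∀ a b : Char, (some a == some b) = (a == b) from fun _ _ => rfl]
    generalize pvForbidden.contains c = A
    generalize (c == '.') = D
    generalize (prev == some '.') = P
    generalize pvHeadDot rest = H
    generalize pvHasDD rest = G
    generalize (rest.all fun c => !pvForbidden.contains c) = AL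
    generalize (!PySem.Chars.isspace c) = W
    generalize (rest.any fun c => !PySem.Chars.isspace c) = AN
    cases A <;> cases P <;> cases D <;> cases H <;> cases G <;>
      cases seen <;> cases W <;> cases AN <;> simp

theorem pvSingleton_infix (c : Char) (l : List Char) : [c] <:+: l ↔ c ∈ l := by
  constructor
  · intro h; exact h.mem (by simp)
  · intro h
    rcases List.mem_iff_append.mp h with ⟨s, t, rfl⟩
    exact ⟨s, t, by simp⟩

theorem pvStrip_eq (f : String) :
    (PySem.Str.strip f == "") = !(f.toList.any fun c => !PySem.Chars.isspace c) := by
  rw [Bool.eq_iff_iff]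
  simp only [beq_iff_eq, Bool.not_eq_true', List.any_eq_false]
  rw [← String.toList_inj]
  simp only [PySem.Str.toList_strip]
  rw [show ("" : String).toList = [] from rfl, pvStrip_nil_iff]
  simp

theorem pvIn_single (s : String) (c : Char) (f : String) (hs : s.toList = [c]) :
    PySem.Str.isIn s f = f.toList.contains c := by
  rw [Bool.eq_iff_iff, PySem.Str.isIn_iff_infix, hs, pvSingleton_infix]
  simp

theorem pvIn_dd (f : String) : PySem.Str.isIn ".." f = pvHasDD f.toList := by
  rw [Bool.eq_iff_iff, PySem.Str.isIn_iff_infix,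
    show ("..": String).toList = ['.', '.'] from rfl, pvHasDD_iff]

theorem pvAll_forb (l : List Char) :
    (l.all fun c => !pvForbidden.contains c) =
      !(l.contains '/' || l.contains '\\' || l.contains '<' || l.contains '>' ||
        l.contains ':' || l.contains '"' || l.contains '|' || l.contains '?' || l.contains '*') := by
  rw [Bool.eq_iff_iff]
  simp [pvForbidden, List.all_eq_true, PySem.Set.mem_ofList]
  constructor
  · intro h
    repeat' constructor
    all_goals (intro hc; have := h _ hc; tauto)
  · intro h c hc
    refine ⟨?_, ?_, ?_, ?_, ?_, ?_, ?_, ?_, ?_⟩ <;> (rintro rfl; tauto)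

theorem pvMain (f : String) : is_filename_safe f = is_filename_safe_alt f := by
  unfold is_filename_safe is_filename_safe_alt
  rw [pvScan_spec, pvAll_forb, pvIn_dd,
    pvIn_single "/" '/' f rfl, pvIn_single "\\" '\\' f rfl]
  simp only [List.any_cons, List.any_nil,
    pvIn_single "<" '<' f rfl, pvIn_single ">" '>' f rfl, pvIn_single ":" ':' f rfl,
    pvIn_single "\"" '"' f rfl, pvIn_single "|" '|' f rfl, pvIn_single "?" '?' f rfl,
    pvIn_single "*" '*' f rfl, pvStrip_eq f]
  simp only [show ((none : Option Char) == some '.') = false from rfl,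
    Bool.false_and, Bool.not_false, Bool.and_true, Bool.false_or, Bool.or_false]
  generalize f.toList.contains '/' = b1
  generalize f.toList.contains '\\' = b2
  generalize f.toList.contains '<' = b3
  generalize f.toList.contains '>' = b4
  generalize f.toList.contains ':' = b5
  generalize f.toList.contains '"' = b6
  generalize f.toList.contains '|' = b7
  generalize f.toList.contains '?' = b8
  generalize f.toList.contains '*' = b9
  generalize pvHasDD f.toList = dd
  generalize (f.toList.any fun c => !PySem.Chars.isspace c) = an
  split_ifs with h1 h2 h3 h4 <;> simp_all <;> intros <;> simp_all

-- ===== VERDICT (by name: the statement is the Claim_ definition above) =====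
theorem is_filename_safe_spec : Claim_equal_is_filename_safe := by
  intro f _
  exact pvMain f
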